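-- pv_equiv track=rewrite | github.com/Emad78/features_generation | generateFeatures.py | bound_tightening
-- ===== SOURCE A (Python) =====
-- SHORT_TERM = 5
--
-- def bound_tightening(upperBound, lowerBound):
--     tighten = [0] * len(upperBound)
--     for i in range(SHORT_TERM, len(upperBound)):
--         diff = float("Inf")
--         isTighten = 1
--         for j in range(i-SHORT_TERM, i+1):
--             if upperBound[j] - lowerBound[j]<diff:
--                 diff = upperBound[j] - lowerBound[j]
--             else:
--                 isTighten = 0
--         tighten[i] = isTighten
--
--     return tighten
-- ===== SOURCE B (Python) =====
-- SHORT_TERM = 5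
--
-- def bound_tightening(upperBound, lowerBound):
--     n = len(upperBound)
--     tighten = [0] * n
--     if n <= SHORT_TERM:
--         return tighten
--     d = [upperBound[k] - lowerBound[k] for k in range(n)]
--     run = 0
--     for k in range(1, n):
--         run = run + 1 if d[k] < d[k - 1] else 0
--         if k >= SHORT_TERM and run >= SHORT_TERM:
--             tighten[k] = 1
--     return tighten
-- ===== Notes on version B (the rewrite author's own statement) =====
-- stated objective: faster
-- what changed: Replaces the nested per-window rescan (each index re-checks all 6 window elements against a running minimum) by one left-to-right pass maintaining a run counter of consecutive strict decreases of the diff sequence.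
import Mathlib
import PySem

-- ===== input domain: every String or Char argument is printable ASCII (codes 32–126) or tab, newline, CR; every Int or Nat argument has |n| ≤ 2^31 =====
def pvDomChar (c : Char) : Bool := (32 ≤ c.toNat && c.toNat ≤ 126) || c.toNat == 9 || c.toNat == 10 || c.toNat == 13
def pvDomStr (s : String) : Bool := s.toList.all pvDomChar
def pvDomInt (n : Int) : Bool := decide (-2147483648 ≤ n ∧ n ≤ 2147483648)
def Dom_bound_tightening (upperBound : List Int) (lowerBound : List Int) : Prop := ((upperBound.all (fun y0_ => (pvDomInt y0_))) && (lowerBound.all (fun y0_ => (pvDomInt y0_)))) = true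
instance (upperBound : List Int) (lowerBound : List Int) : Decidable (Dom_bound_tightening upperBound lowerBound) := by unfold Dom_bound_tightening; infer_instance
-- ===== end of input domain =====

-- B replaces A's nested per-window rescan by a single pass with a run counter of consecutive strict decreases (objective: faster, constant factor).

-- ===== PORT A =====
-- diff = float("Inf") is modelled as Option Int: none = +Inf (the first comparison is always true).
def bound_tightening (upperBound : List Int) (lowerBound : List Int) : List Int :=
  let tighten : List Int := List.replicate upperBound.length 0
  (PySem.List.pyRange 5 upperBound.length 1).foldl (fun tighten i =>
    let st :=
      (PySem.List.pyRange (i - 5) (i + 1) 1).foldl (fun (st : Option Int × Int) j =>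
        let dj := PySem.List.pyGetD upperBound j 0 - PySem.List.pyGetD lowerBound j 0
        if (match st.1 with
            | none => true
            | some v => decide (dj < v)) then (some dj, st.2) else (st.1, 0))
        (none, 1)
    PySem.List.pySetD tighten i st.2) tighten

-- ===== PORT B =====
def bound_tightening_alt (upperBound : List Int) (lowerBound : List Int) : List Int :=
  let n : Int := upperBound.length
  let tighten : List Int := List.replicate upperBound.length 0
  if n ≤ 5 then tighten
  else
    let d := (PySem.List.pyRange 0 n 1).map
      (fun k => PySem.List.pyGetD upperBound k 0 - PySem.List.pyGetD lowerBound k 0)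
    ((PySem.List.pyRange 1 n 1).foldl (fun (st : Int × List Int) k =>
        let run : Int := if PySem.List.pyGetD d k 0 < PySem.List.pyGetD d (k - 1) 0 then st.1 + 1 else 0
        let tighten := if 5 ≤ k ∧ 5 ≤ run then PySem.List.pySetD st.2 k 1 else st.2
        (run, tighten)) (0, tighten)).2

-- ===== PRECONDITION & SPEC =====
-- Pre_ excludes exactly the inputs where Python A raises IndexError: len(upperBound) ≥ 6 while lowerBound is shorter than upperBound.
def Pre_bound_tightening (upperBound : List Int) (lowerBound : List Int) : Prop :=
  upperBound.length ≤ 5 ∨ upperBound.length ≤ lowerBound.length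
instance (upperBound : List Int) (lowerBound : List Int) : Decidable (Pre_bound_tightening upperBound lowerBound) := by unfold Pre_bound_tightening; infer_instance

def pvWitness_bound_tightening : List Int × List Int :=
  ([6, 5, 4, 3, 2, 1, 0], [0, 0, 0, 0, 0, 0, 0])

def Spec_bound_tightening (upperBound : List Int) (lowerBound : List Int) (out : List Int) : Prop := out = bound_tightening_alt upperBound lowerBound
instance (upperBound : List Int) (lowerBound : List Int) (out : List Int) : Decidable (Spec_bound_tightening upperBound lowerBound out) := by unfold Spec_bound_tightening; infer_instance

-- ===== CLAIM (what is proved, stated in full; the proofs are below) =====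
def Claim_equal_bound_tightening : Prop := ∀ (upperBound : List Int) (lowerBound : List Int), Dom_bound_tightening upperBound lowerBound → Pre_bound_tightening upperBound lowerBound → Spec_bound_tightening upperBound lowerBound (bound_tightening upperBound lowerBound)

-- ===== LEMMAS AND PROOFS =====

-- the diff sequence, Nat-indexed (indices used by both ports are in range, so getD is exact)
def dN (u l : List Int) (k : Nat) : Int := u.getD k 0 - l.getD k 0

-- length of the run of consecutive strict decreases of dN ending at k
def runF (u l : List Int) : Nat → Nat
  | 0 => 0
  | k + 1 => if dN u l (k + 1) < dN u l k then runF u l k + 1 else 0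

-- minimum of dN over the window [a, a+c]
def mwin (u l : List Int) (a : Nat) : Nat → Int
  | 0 => dN u l a
  | c + 1 => min (mwin u l a c) (dN u l (a + c + 1))

-- the common specification of both outputs
def specList (u l : List Int) : List Int :=
  (List.range u.length).map (fun k => if 5 ≤ k ∧ 5 ≤ runF u l k then 1 else 0)

theorem runF_succ_le (u l : List Int) (k : Nat) : runF u l (k + 1) ≤ runF u l k + 1 := by
  simp only [runF]; split <;> omega

-- A's inner loop, restated over Nat indices
def stepA (u l : List Int) (st : Option Int × Int) (j : Nat) : Option Int × Int :=
  let dj := dN u l j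
  if (match st.1 with
      | none => true
      | some v => decide (dj < v)) then (some dj, st.2) else (st.1, 0)

theorem inner_char (u l : List Int) (a c : Nat) :
    (List.range (c + 1)).foldl (fun st k => stepA u l st (a + k)) (none, 1)
      = (some (mwin u l a c), if c ≤ runF u l (a + c) then 1 else 0)
    ∧ (c ≤ runF u l (a + c) → mwin u l a c = dN u l (a + c)) := by
  induction c with
  | zero =>
      simp [List.range_succ, stepA, mwin]
  | succ c ih =>
      rw [List.range_succ, List.foldl_append, ih.1]
      simp only [List.foldl_cons, List.foldl_nil, stepA, mwin]
      by_cases hlt : dN u l (a + (c + 1)) < mwin u l a c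
      · have hmin : min (mwin u l a c) (dN u l (a + c + 1)) = dN u l (a + c + 1) := by
          have : a + (c + 1) = a + c + 1 := by omega
          rw [this] at hlt; omega
        by_cases hr : c ≤ runF u l (a + c)
        · have hm := ih.2 hr
          have hstep : runF u l (a + c + 1) = runF u l (a + c) + 1 := by
            simp only [runF]
            rw [if_pos (by rw [hm] at hlt; omega)]
          constructor
          · simp only [hlt, decide_true, if_true, if_pos hr]
            have h1 : c + 1 ≤ runF u l (a + (c + 1)) := by
              have : a + (c + 1) = a + c + 1 := by omega
              rw [this, hstep]; omega
            rw [if_pos h1, hmin]; rfl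
          · intro _; rw [hmin]; rfl
        · have h1 : ¬ (c + 1 ≤ runF u l (a + (c + 1))) := by
            have : a + (c + 1) = a + c + 1 := by omega
            rw [this]
            have := runF_succ_le u l (a + c)
            omega
          constructor
          · simp only [hlt, decide_true, if_true, if_neg hr, if_neg h1, hmin]
            rfl
          · intro h; exact absurd h h1
      · -- dN (a+c+1) ≥ current window minimum: isTighten becomes 0
        have hmin : min (mwin u l a c) (dN u l (a + c + 1)) = mwin u l a c := by
          have : a + (c + 1) = a + c + 1 := by omega
          rw [this] at hlt; omega
        have h1 : ¬ (c + 1 ≤ runF u l (a + (c + 1))) := by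
          intro hcon
          have heq : a + (c + 1) = a + c + 1 := by omega
          rw [heq] at hcon
          have hne : runF u l (a + c + 1) ≠ 0 := by omega
          have hd : dN u l (a + c + 1) < dN u l (a + c) := by
            by_contra hnd
            simp only [runF, if_neg hnd] at hne
            exact hne rfl
          have hstep : runF u l (a + c + 1) = runF u l (a + c) + 1 := by
            simp only [runF, if_pos hd]
          have hr : c ≤ runF u l (a + c) := by omega
          have hm := ih.2 hr
          rw [hm] at hlt
          have : a + (c + 1) = a + c + 1 := by omega
          rw [this] at hlt
          exact hlt hd
        constructor
        · simp [hlt, hmin]; omega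
        · intro h; exact absurd h h1

theorem set_map_range {n i : Nat} (f : Nat → Int) (v : Int) (_hi : i < n) :
    ((List.range n).map f).set i v
      = (List.range n).map (fun k => if k = i then v else f k) := by
  apply List.ext_getElem
  · simp
  · intro k h1 h2
    simp only [List.getElem_set, List.getElem_map, List.getElem_range]
    by_cases h : k = i <;> simp [h] <;> omega

theorem replicate_eq_map_range (n : Nat) :
    List.replicate n (0 : Int) = (List.range n).map (fun _ => 0) := by
  simp [List.map_const']

-- characterization of A's outer loop after m iterations (positions 5..5+m-1 written)
theorem A_outer (u l : List Int) (m : Nat) (hm : 5 + m ≤ u.length) :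
    (List.range m).foldl
      (fun t k => t.set (5 + k) (if 5 ≤ runF u l (5 + k) then (1 : Int) else 0))
      (List.replicate u.length 0)
      = (List.range u.length).map
          (fun k => if 5 ≤ k ∧ k < 5 + m ∧ 5 ≤ runF u l k then 1 else 0) := by
  induction m with
  | zero =>
      rw [replicate_eq_map_range]
      simp only [List.range_zero, List.foldl_nil]
      apply List.map_congr_left
      intro k _
      split_ifs <;> omega
  | succ m ih =>
      rw [List.range_succ, List.foldl_append, ih (by omega)]
      simp only [List.foldl_cons, List.foldl_nil]
      rw [set_map_range _ _ (by omega)]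
      apply List.map_congr_left
      intro k hk
      rw [List.mem_range] at hk
      by_cases he : k = 5 + m
      · subst he; simp only [if_pos]; split_ifs <;> omega
      · rw [if_neg he]; split_ifs <;> omega

theorem A_char (u l : List Int) : bound_tightening u l = specList u l := by
  unfold bound_tightening specList
  rw [PySem.List.pyRange_one]
  rw [List.foldl_map]
  have hfun : ∀ (t : List Int) (k : Nat), (fun (tighten : List Int) (i : Int) =>
      PySem.List.pySetD tighten i
        ((PySem.List.pyRange (i - 5) (i + 1) 1).foldl (fun (st : Option Int × Int) j =>
          let dj := PySem.List.pyGetD u j 0 - PySem.List.pyGetD l j 0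
          if (match st.1 with
              | none => true
              | some v => decide (dj < v)) then (some dj, st.2) else (st.1, 0)) (none, 1)).2)
      t (5 + (k : Int))
      = t.set (5 + k) (if 5 ≤ runF u l (5 + k) then (1 : Int) else 0) := by
    intro t k
    dsimp only
    have hrange : PySem.List.pyRange ((5 + (k : Int)) - 5) ((5 + (k : Int)) + 1) 1
        = (List.range 6).map (fun j => ((k + j : Nat) : Int)) := by
      rw [PySem.List.pyRange_one]
      rw [show (5 + (k : Int)) - 5 = (k : Int) by omega,
          show ((5 + (k : Int) + 1) - (k : Int)).toNat = 6 by omega]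
      apply List.map_congr_left
      intro j _
      push_cast; ring
    rw [hrange, List.foldl_map]
    have hstep : (fun (st : Option Int × Int) (j : Nat) =>
        (fun (st : Option Int × Int) (j : Int) =>
          let dj := PySem.List.pyGetD u j 0 - PySem.List.pyGetD l j 0
          if (match st.1 with
              | none => true
              | some v => decide (dj < v)) then (some dj, st.2) else (st.1, 0)) st ((k + j : Nat) : Int))
        = (fun st j => stepA u l st (k + j)) := by
      funext st j
      simp only [stepA, dN, PySem.List.pyGetD_natCast, List.getD_eq_getElem?_getD]
    rw [hstep]
    have := (inner_char u l k 5).1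
    rw [show (5 + 1) = 6 from rfl] at this
    rw [this]
    simp only []
    rw [show (5 + (k : Int)) = ((5 + k : Nat) : Int) by push_cast; ring,
        PySem.List.pySetD_natCast]
    congr 1
    rw [show k + 5 = 5 + k by omega]
  rw [PySem.List.foldl_congr_mem (List.range ((u.length : Int) - 5).toNat) _
        (fun t k => t.set (5 + k) (if 5 ≤ runF u l (5 + k) then (1 : Int) else 0))
        (List.replicate u.length 0) (fun t k _ => hfun t k)]
  by_cases hn : 5 ≤ u.length
  · have hm : ((u.length : Int) - 5).toNat = u.length - 5 := by omega
    rw [hm, A_outer u l (u.length - 5) (by omega)]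
    apply List.map_congr_left
    intro k hk
    rw [List.mem_range] at hk
    split_ifs <;> omega
  · have hm : ((u.length : Int) - 5).toNat = 0 := by omega
    rw [hm]
    simp only [List.range_zero, List.foldl_nil]
    rw [replicate_eq_map_range]
    apply List.map_congr_left
    intro k hk
    rw [List.mem_range] at hk
    split_ifs <;> omega

-- B's loop step, restated over Nat indices
def stepB (u l : List Int) (st : Int × List Int) (j : Nat) : Int × List Int :=
  let run : Int := if dN u l (j + 1) < dN u l j then st.1 + 1 else 0
  (run, if (5 : Int) ≤ ((j + 1 : Nat) : Int) ∧ 5 ≤ run then st.2.set (j + 1) 1 else st.2)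

-- characterization of B's loop after m iterations (indices 1..m processed)
theorem B_loop (u l : List Int) (m : Nat) (hm : m < u.length) :
    (List.range m).foldl (stepB u l) (0, List.replicate u.length 0)
      = ((runF u l m : Int),
         (List.range u.length).map (fun k => if 5 ≤ k ∧ k ≤ m ∧ 5 ≤ runF u l k then 1 else 0)) := by
  induction m with
  | zero =>
      simp only [List.range_zero, List.foldl_nil, runF, Nat.cast_zero]
      rw [replicate_eq_map_range]
      refine Prod.ext rfl ?_
      simp only []
      apply List.map_congr_left
      intro k _
      split_ifs <;> omega
  | succ m ih =>
      rw [List.range_succ, List.foldl_append, ih (by omega)]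
      simp only [List.foldl_cons, List.foldl_nil, stepB]
      have hrun : (if dN u l (m + 1) < dN u l m then ((runF u l m : Int)) + 1 else 0)
          = ((runF u l (m + 1) : Int)) := by
        simp only [runF]
        split_ifs <;> push_cast <;> ring
      rw [hrun]
      refine Prod.ext rfl ?_
      simp only []
      by_cases hc : (5 : Int) ≤ ((m + 1 : Nat) : Int) ∧ (5 : Int) ≤ ((runF u l (m + 1) : Int))
      · rw [if_pos hc]
        have hc' : 5 ≤ m + 1 ∧ 5 ≤ runF u l (m + 1) := by
          constructor <;> [exact_mod_cast hc.1; exact_mod_cast hc.2]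
        rw [set_map_range _ _ (by omega)]
        apply List.map_congr_left
        intro k hk
        rw [List.mem_range] at hk
        by_cases he : k = m + 1
        · subst he; simp only [if_pos]; split_ifs <;> omega
        · rw [if_neg he]; split_ifs <;> omega
      · rw [if_neg hc]
        have hc' : ¬ (5 ≤ m + 1 ∧ 5 ≤ runF u l (m + 1)) := by
          intro h; exact hc ⟨by exact_mod_cast h.1, by exact_mod_cast h.2⟩
        apply List.map_congr_left
        intro k hk
        rw [List.mem_range] at hk
        by_cases he : k = m + 1
        · subst he; split_ifs <;> omega
        · split_ifs <;> omega

theorem specList_of_short (u l : List Int) (hn : u.length ≤ 5) :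
    specList u l = List.replicate u.length 0 := by
  unfold specList
  rw [replicate_eq_map_range]
  apply List.map_congr_left
  intro k hk
  rw [List.mem_range] at hk
  split_ifs <;> omega

theorem B_char (u l : List Int) :
    bound_tightening_alt u l = specList u l := by
  unfold bound_tightening_alt
  simp only []
  by_cases hn : (u.length : Int) ≤ 5
  · rw [if_pos hn, specList_of_short u l (by omega)]
  · rw [if_neg hn]
    rw [PySem.List.pyRange_one 1 (u.length : Int), List.foldl_map]
    have hconv : ∀ (st : Int × List Int) (j : Nat), j ∈ List.range (((u.length : Int) - 1).toNat) →
        (fun (st : Int × List Int) (k : Int) =>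
          let run : Int := if PySem.List.pyGetD
              ((PySem.List.pyRange 0 (u.length : Int) 1).map
                (fun k => PySem.List.pyGetD u k 0 - PySem.List.pyGetD l k 0)) k 0
            < PySem.List.pyGetD
              ((PySem.List.pyRange 0 (u.length : Int) 1).map
                (fun k => PySem.List.pyGetD u k 0 - PySem.List.pyGetD l k 0)) (k - 1) 0
            then st.1 + 1 else 0
          (run, if 5 ≤ k ∧ 5 ≤ run then PySem.List.pySetD st.2 k 1 else st.2))
          st (1 + (j : Int))
        = stepB u l st j := by
      intro st j hj
      rw [List.mem_range] at hj
      have hj' : j + 1 < u.length := by omega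
      dsimp only
      rw [show (1 + (j : Int)) = ((j + 1 : Nat) : Int) by push_cast; ring]
      rw [show ((j + 1 : Nat) : Int) - 1 = ((j : Nat) : Int) by push_cast; ring]
      rw [PySem.List.pyGetD_map_pyRange _ u.length (j + 1) _ (by omega),
          PySem.List.pyGetD_map_pyRange _ u.length j _ (by omega)]
      simp only [stepB, dN, PySem.List.pyGetD_natCast, PySem.List.pySetD_natCast,
        List.getD_eq_getElem?_getD]
    rw [PySem.List.foldl_congr_mem _ _ (stepB u l) _ hconv]
    rw [show ((u.length : Int) - 1).toNat = u.length - 1 by omega]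
    rw [B_loop u l (u.length - 1) (by omega)]
    unfold specList
    apply List.map_congr_left
    intro k hk
    rw [List.mem_range] at hk
    split_ifs <;> omega

-- ===== VERDICT (by name: the statement is the Claim_ definition above) =====
theorem bound_tightening_spec : Claim_equal_bound_tightening := by
  intro u l _ _
  unfold Spec_bound_tightening
  rw [A_char, B_char]
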